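-- pv_equiv track=rewrite | github.com/iwashiiro/OffTopic | solve.py | recover
-- ===== SOURCE A (Python) =====
-- def recover(v):
--     for m0 in range(10):
--         rem = v + 9 * m0
--         if rem % 10 == 0:
--             m1 = rem // 10
--             if 0 <= m1 <= 9:
--                 return m0, m1
--     raise ValueError(f"No solution for v={v}")
-- ===== SOURCE B (Python) =====
-- def recover(v):
--     # Closed form: m0 must be congruent to v mod 10, so m0 = v % 10 directly.
--     m0 = v % 10
--     rem = v + 9 * m0
--     if rem % 10 == 0:
--         m1 = rem // 10
--         if 0 <= m1 <= 9:
--             return m0, m1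
--     raise ValueError(f"No solution for v={v}")
-- ===== Notes on version B (the rewrite author's own statement) =====
-- stated objective: simpler
-- what changed: Replaced the digit-by-digit loop searching for m0 with a closed form: m0 is computed directly as the residue of v modulo ten (the unique digit making rem divisible by ten), keeping only the range check on m1.
import Mathlib
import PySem

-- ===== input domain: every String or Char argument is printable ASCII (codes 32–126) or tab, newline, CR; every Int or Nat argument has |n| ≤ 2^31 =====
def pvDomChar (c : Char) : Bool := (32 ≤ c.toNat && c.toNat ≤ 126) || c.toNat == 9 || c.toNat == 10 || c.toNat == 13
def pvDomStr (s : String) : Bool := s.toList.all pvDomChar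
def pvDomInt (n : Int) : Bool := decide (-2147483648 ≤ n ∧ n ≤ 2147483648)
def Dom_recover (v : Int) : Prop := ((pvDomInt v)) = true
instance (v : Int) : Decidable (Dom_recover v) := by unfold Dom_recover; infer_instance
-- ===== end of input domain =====

-- B replaces A's digit loop for m0 by the closed form m0 = v mod ten (simpler; same raises, excluded by Pre_).

-- ===== PORT A =====
-- the for-loop with early return, as structural recursion over range(10)
def recoverLoop (v : Int) : List Int → Option (Int × Int)
  | [] => none
  | m0 :: rest =>
    let rem := v + 9 * m0
    if PySem.Int.mod rem 10 = 0 then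
      let m1 := PySem.Int.floordiv rem 10
      if 0 ≤ m1 ∧ m1 ≤ 9 then some (m0, m1)
      else recoverLoop v rest
    else recoverLoop v rest

def recover (v : Int) : Int × Int :=
  (recoverLoop v (PySem.List.pyRange 0 10 1)).getD (0, 0)  -- none = the raise, excluded by Pre_

-- ===== PORT B =====
def recover_alt (v : Int) : Int × Int :=
  let m0 := PySem.Int.mod v 10
  let rem := v + 9 * m0
  if PySem.Int.mod rem 10 = 0 then
    let m1 := PySem.Int.floordiv rem 10
    if 0 ≤ m1 ∧ m1 ≤ 9 then (m0, m1)
    else (0, 0)  -- the raise, excluded by Pre_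
  else (0, 0)    -- the raise, excluded by Pre_

-- ===== PRECONDITION & SPEC =====
-- Pre_ excludes exactly the inputs where A (and B) raises ValueError: a solution exists iff
-- rem = v plus nine times (v mod ten) is a two-digit nonnegative number (its divisibility by ten is automatic).
def Pre_recover (v : Int) : Prop :=
  0 ≤ v + 9 * PySem.Int.mod v 10 ∧ v + 9 * PySem.Int.mod v 10 ≤ 99
instance (v : Int) : Decidable (Pre_recover v) := by unfold Pre_recover; infer_instance
def pvWitness_recover : Int := 23

def Spec_recover (v : Int) (out : Int × Int) : Prop := out = recover_alt v
instance (v : Int) (out : Int × Int) : Decidable (Spec_recover v out) := by unfold Spec_recover; infer_instance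

-- ===== CLAIM (what is proved, stated in full; the proofs are below) =====
def Claim_equal_recover : Prop := ∀ (v : Int), Dom_recover v → Pre_recover v → Spec_recover v (recover v)

-- ===== LEMMAS AND PROOFS =====
theorem recover_bounds {v : Int} (h : Pre_recover v) : -81 ≤ v ∧ v ≤ 99 := by
  obtain ⟨h1, h2⟩ := h
  rw [PySem.Int.mod_eq_emod_of_pos (by omega : (0:Int) < 10)] at h1 h2
  have := Int.emod_nonneg v (by omega : (10:Int) ≠ 0)
  have := Int.emod_lt_of_pos v (by omega : (0:Int) < 10)
  omega

-- ===== VERDICT (by name: the statement is the Claim_ definition above) =====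
theorem recover_spec : Claim_equal_recover := by
  intro v _ hpre
  obtain ⟨h1, h2⟩ := recover_bounds hpre
  unfold Spec_recover
  interval_cases v <;> decide
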